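-- pv_equiv track=rewrite | github.com/denisuleung/-python_youtube-new | main.py | get_title_contain_episode
-- ===== SOURCE A (Python) =====
-- def get_title_contain_episode(x):
--     episode_possible_lst = ['#' + str(x) for x in range(10)]
--     episode_possible_lst.extend(['NO' + str(x) for x in range(10)])
--     trim_title = x.replace(" ", "").upper()
--     if trim_title.find('EPISODE') != -1 or any(x in trim_title for x in episode_possible_lst):
--         return True
--     else:
--         return False
-- ===== SOURCE B (Python) =====
-- def get_title_contain_episode(x):
--     # One left-to-right scan of the cleaned title instead of building the
--     # 20-pattern list and running a membership test per pattern.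
--     t = x.replace(" ", "").upper()
--     n = len(t)
--     for i in range(n):
--         if t.startswith('EPISODE', i):
--             return True
--         if t[i] == '#' and i + 1 < n and t[i + 1].isdigit():
--             return True
--         if t.startswith('NO', i) and i + 2 < n and t[i + 2].isdigit():
--             return True
--     return False
-- ===== Notes on version B (the rewrite author's own statement) =====
-- stated objective: alternative
-- what changed: Instead of materialising the 20 candidate patterns ('#0'..'#9','NO0'..'NO9') and testing each for substring containment, B makes a single left-to-right scan of the cleaned title, recognising 'EPISODE', '#'+digit or 'NO'+digit at each position.
import Mathlib
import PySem

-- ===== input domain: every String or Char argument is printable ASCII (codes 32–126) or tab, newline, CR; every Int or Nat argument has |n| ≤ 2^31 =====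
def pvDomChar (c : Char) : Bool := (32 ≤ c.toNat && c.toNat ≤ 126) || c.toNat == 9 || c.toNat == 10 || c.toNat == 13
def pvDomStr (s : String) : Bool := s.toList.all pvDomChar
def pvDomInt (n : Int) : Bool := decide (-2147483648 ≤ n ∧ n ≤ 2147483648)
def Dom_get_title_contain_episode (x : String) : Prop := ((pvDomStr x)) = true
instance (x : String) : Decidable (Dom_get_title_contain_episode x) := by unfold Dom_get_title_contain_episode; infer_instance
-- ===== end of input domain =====

-- B replaces A's 20-pattern substring-membership test by a single left-to-right scan
-- of the cleaned title (alternative algorithm, same exact Boolean result).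


-- ===== PORT A =====
-- literal transliteration of A; string methods via PySem.Chars (the .toList form of str.replace/upper/find/in)
def get_title_contain_episode (x : String) : Bool :=
  -- episode_possible_lst = ['#' + str(x) for x in range(10)]
  let episode_possible_lst : List (List Char) :=
    (PySem.List.pyRange 0 10 1).map (fun n => '#' :: PySem.Int.toChars n)
  -- episode_possible_lst.extend(['NO' + str(x) for x in range(10)])
  let episode_possible_lst :=
    episode_possible_lst ++ (PySem.List.pyRange 0 10 1).map (fun n => 'N' :: 'O' :: PySem.Int.toChars n)
  -- trim_title = x.replace(" ", "").upper()
  let trim_title := PySem.Chars.upper (PySem.Chars.replace x.toList [' '] [])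
  -- if trim_title.find('EPISODE') != -1 or any(x in trim_title for x in episode_possible_lst): return True else: return False
  if PySem.Chars.find trim_title ['E','P','I','S','O','D','E'] != -1
     || episode_possible_lst.any (fun p => PySem.Chars.isIn p trim_title) then
    true
  else
    false

-- ===== PORT B =====
-- t[i+k].isdigit() guarded by i+k < n in Source B: a digit test on the head of a suffix
def pvHeadDigit : List Char → Bool
  | [] => false
  | d :: _ => PySem.Chars.isdigit d

-- Source B's for-loop over positions i, as structural recursion over the suffix t[i:]
def pvScan : List Char → Bool
  | [] => false
  | c :: rest =>
    if PySem.Chars.startswith (c :: rest) ['E','P','I','S','O','D','E'] then true       -- t.startswith('EPISODE', i)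
    else if c == '#' && pvHeadDigit rest then true                                      -- t[i]=='#' and t[i+1].isdigit()
    else if PySem.Chars.startswith (c :: rest) ['N','O'] && pvHeadDigit (rest.drop 1) then true  -- t.startswith('NO', i) and t[i+2].isdigit()
    else pvScan rest

def get_title_contain_episode_alt (x : String) : Bool :=
  pvScan (PySem.Chars.upper (PySem.Chars.replace x.toList [' '] []))

-- ===== PRECONDITION & SPEC =====
def Spec_get_title_contain_episode (x : String) (out : Bool) : Prop := out = get_title_contain_episode_alt x
instance (x : String) (out : Bool) : Decidable (Spec_get_title_contain_episode x out) := by unfold Spec_get_title_contain_episode; infer_instance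

-- ===== CLAIM (what is proved, stated in full; the proofs are below) =====
def Claim_equal_get_title_contain_episode : Prop := ∀ (x : String), Dom_get_title_contain_episode x → Spec_get_title_contain_episode x (get_title_contain_episode x)

-- ===== LEMMAS AND PROOFS =====

-- "a match starts at this suffix": the common characterisation of both programs
def pvP (u : List Char) : Prop :=
  ['E','P','I','S','O','D','E'] <+: u
  ∨ (∃ d, PySem.Chars.isdigit d = true ∧ ['#', d] <+: u)
  ∨ (∃ d, PySem.Chars.isdigit d = true ∧ ['N', 'O', d] <+: u)

-- A's literal pattern list (what the two range-comprehensions build)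
def pvLit20 : List (List Char) :=
  [['#','0'],['#','1'],['#','2'],['#','3'],['#','4'],['#','5'],['#','6'],['#','7'],['#','8'],['#','9'],
   ['N','O','0'],['N','O','1'],['N','O','2'],['N','O','3'],['N','O','4'],['N','O','5'],['N','O','6'],['N','O','7'],['N','O','8'],['N','O','9']]

lemma pvP_nil : ¬ pvP [] := by
  rintro (h | ⟨d, _, h⟩ | ⟨d, _, h⟩) <;> simp at h

lemma digit_cases (c : Char) (h : PySem.Chars.isdigit c = true) :
    c ∈ ['0','1','2','3','4','5','6','7','8','9'] := by
  simp only [PySem.Chars.isdigit, Bool.and_eq_true, decide_eq_true_eq, Char.le_def] at h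
  have hb : 48 ≤ c.toNat ∧ c.toNat ≤ 57 := ⟨by exact_mod_cast h.1, by exact_mod_cast h.2⟩
  have hc : c = Char.ofNat c.toNat := by simp [Char.ofNat_toNat]
  obtain ⟨h1, h2⟩ := hb
  interval_cases h : c.toNat <;> rw [hc] <;> decide

-- the two-character pattern test of Source B, as a prefix statement
lemma hash_iff (c : Char) (rest : List Char) :
    (c == '#' && pvHeadDigit rest) = true ↔ ∃ d, PySem.Chars.isdigit d = true ∧ ['#', d] <+: c :: rest := by
  match rest with
  | [] => simp [pvHeadDigit, List.cons_prefix_cons]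
  | d :: r =>
    simp [pvHeadDigit, List.cons_prefix_cons]
    aesop

-- the three-character pattern test of Source B, as a prefix statement
lemma no_iff (c : Char) (rest : List Char) :
    (PySem.Chars.startswith (c :: rest) ['N','O'] && pvHeadDigit (rest.drop 1)) = true
      ↔ ∃ d, PySem.Chars.isdigit d = true ∧ ['N', 'O', d] <+: c :: rest := by
  rw [Bool.and_eq_true, PySem.Chars.startswith_iff]
  match rest with
  | [] => simp [pvHeadDigit, List.cons_prefix_cons]
  | [o] => simp [pvHeadDigit, List.cons_prefix_cons]
  | o :: d :: r =>
    simp [pvHeadDigit, List.cons_prefix_cons]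
    aesop

lemma pvScan_cons_iff (c : Char) (rest : List Char) :
    pvScan (c :: rest) = true ↔ pvP (c :: rest) ∨ pvScan rest = true := by
  rw [pvScan]
  split_ifs with h1 h2 h3
  · exact iff_of_true rfl (Or.inl (Or.inl ((PySem.Chars.startswith_iff _ _).mp h1)))
  · exact iff_of_true rfl (Or.inl (Or.inr (Or.inl ((hash_iff c rest).mp h2))))
  · exact iff_of_true rfl (Or.inl (Or.inr (Or.inr ((no_iff c rest).mp h3))))
  · constructor
    · exact Or.inr
    · rintro ((h | h | h) | h)
      · exact absurd ((PySem.Chars.startswith_iff _ _).mpr h) h1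
      · exact absurd ((hash_iff c rest).mpr h) h2
      · exact absurd ((no_iff c rest).mpr h) h3
      · exact h

lemma pvScan_iff (t : List Char) : pvScan t = true ↔ ∃ i, pvP (t.drop i) := by
  induction t with
  | nil =>
    rw [show pvScan [] = false from rfl]
    simp only [List.drop_nil]
    constructor
    · intro h; cases h
    · rintro ⟨i, hi⟩; exact absurd hi pvP_nil
  | cons c rest ih =>
    rw [pvScan_cons_iff, ih]
    constructor
    · rintro (h | ⟨i, hi⟩)
      · exact ⟨0, h⟩
      · exact ⟨i + 1, hi⟩
    · rintro ⟨i, hi⟩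
      match i with
      | 0 => exact Or.inl hi
      | i + 1 => exact Or.inr ⟨i, hi⟩

-- membership in A's literal 20-pattern list, characterised through pvP's shape
lemma mem_lit20 (p : List Char) :
    p ∈ pvLit20 ↔ ∃ d, PySem.Chars.isdigit d = true ∧ (p = ['#', d] ∨ p = ['N','O',d]) := by
  constructor
  · intro h
    simp only [pvLit20, List.mem_cons, List.not_mem_nil, or_false] at h
    rcases h with rfl|rfl|rfl|rfl|rfl|rfl|rfl|rfl|rfl|rfl|rfl|rfl|rfl|rfl|rfl|rfl|rfl|rfl|rfl|rfl <;>
      first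
        | exact ⟨'0', by decide, Or.inl rfl⟩ | exact ⟨'0', by decide, Or.inr rfl⟩
        | exact ⟨'1', by decide, Or.inl rfl⟩ | exact ⟨'1', by decide, Or.inr rfl⟩
        | exact ⟨'2', by decide, Or.inl rfl⟩ | exact ⟨'2', by decide, Or.inr rfl⟩
        | exact ⟨'3', by decide, Or.inl rfl⟩ | exact ⟨'3', by decide, Or.inr rfl⟩
        | exact ⟨'4', by decide, Or.inl rfl⟩ | exact ⟨'4', by decide, Or.inr rfl⟩
        | exact ⟨'5', by decide, Or.inl rfl⟩ | exact ⟨'5', by decide, Or.inr rfl⟩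
        | exact ⟨'6', by decide, Or.inl rfl⟩ | exact ⟨'6', by decide, Or.inr rfl⟩
        | exact ⟨'7', by decide, Or.inl rfl⟩ | exact ⟨'7', by decide, Or.inr rfl⟩
        | exact ⟨'8', by decide, Or.inl rfl⟩ | exact ⟨'8', by decide, Or.inr rfl⟩
        | exact ⟨'9', by decide, Or.inl rfl⟩ | exact ⟨'9', by decide, Or.inr rfl⟩
  · rintro ⟨d, hd, h | h⟩ <;> subst h <;>
      · have hm := digit_cases d hd
        simp only [List.mem_cons, List.not_mem_nil, or_false] at hm
        rcases hm with rfl|rfl|rfl|rfl|rfl|rfl|rfl|rfl|rfl|rfl <;> decide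

-- substring containment as "a prefix of some suffix"
lemma infix_iff_exists_drop (sub t : List Char) :
    PySem.Chars.isIn sub t = true ↔ ∃ j, sub <+: t.drop j :=
  (PySem.Chars.exists_prefix_drop_iff_isIn sub t).symm

lemma a_cond_iff (t : List Char) :
    ((PySem.Chars.find t ['E','P','I','S','O','D','E'] != -1)
      || pvLit20.any (fun p => PySem.Chars.isIn p t)) = true ↔ ∃ i, pvP (t.drop i) := by
  rw [Bool.or_eq_true, List.any_eq_true]
  have hfind : (PySem.Chars.find t ['E','P','I','S','O','D','E'] != -1) = true
      ↔ PySem.Chars.isIn ['E','P','I','S','O','D','E'] t = true := by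
    simp [PySem.Chars.isIn]
  constructor
  · rintro (h | ⟨p, hp, hin⟩)
    · obtain ⟨j, hj⟩ := (infix_iff_exists_drop _ _).mp (hfind.mp h)
      exact ⟨j, Or.inl hj⟩
    · obtain ⟨d, hd, rfl | rfl⟩ := (mem_lit20 p).mp hp
      · obtain ⟨j, hj⟩ := (infix_iff_exists_drop _ _).mp hin
        exact ⟨j, Or.inr (Or.inl ⟨d, hd, hj⟩)⟩
      · obtain ⟨j, hj⟩ := (infix_iff_exists_drop _ _).mp hin
        exact ⟨j, Or.inr (Or.inr ⟨d, hd, hj⟩)⟩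
  · rintro ⟨i, h | ⟨d, hd, h⟩ | ⟨d, hd, h⟩⟩
    · exact Or.inl (hfind.mpr ((infix_iff_exists_drop _ _).mpr ⟨i, h⟩))
    · exact Or.inr ⟨['#', d], (mem_lit20 _).mpr ⟨d, hd, Or.inl rfl⟩,
        (infix_iff_exists_drop _ _).mpr ⟨i, h⟩⟩
    · exact Or.inr ⟨['N','O', d], (mem_lit20 _).mpr ⟨d, hd, Or.inr rfl⟩,
        (infix_iff_exists_drop _ _).mpr ⟨i, h⟩⟩

-- the two range-comprehensions of A build exactly the 20 literal patterns
lemma pattern_list_eq :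
    ((PySem.List.pyRange 0 10 1).map (fun n => '#' :: PySem.Int.toChars n)
      ++ (PySem.List.pyRange 0 10 1).map (fun n => 'N' :: 'O' :: PySem.Int.toChars n)) = pvLit20 := by
  decide

-- ===== VERDICT (by name: the statement is the Claim_ definition above) =====
theorem get_title_contain_episode_spec : Claim_equal_get_title_contain_episode := by
  intro x _
  unfold Spec_get_title_contain_episode
  simp only [get_title_contain_episode, get_title_contain_episode_alt, pattern_list_eq]
  set t := PySem.Chars.upper (PySem.Chars.replace x.toList [' '] []) with ht
  by_cases hC : (PySem.Chars.find t ['E','P','I','S','O','D','E'] != -1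
      || pvLit20.any (fun p => PySem.Chars.isIn p t)) = true
  · rw [if_pos hC]
    exact ((pvScan_iff t).mpr ((a_cond_iff t).mp hC)).symm
  · rw [if_neg hC]
    exact (Bool.eq_false_iff.mpr fun h => hC ((a_cond_iff t).mpr ((pvScan_iff t).mp h))).symm
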